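-- pv_equiv track=rewrite | github.com/nintynick/Spore | spore/loop.py | _extract_metadata
-- ===== SOURCE A (Python) =====
-- def _extract_metadata(response: str) -> tuple[str, str]:
--     """Extract description and hypothesis from the LLM response."""
--     description = ""
--     hypothesis = ""
--     in_code_block = False
--
--     for line in response.strip().split("\n"):
--         line = line.strip()
--         lower = line.lower()
--         if line.startswith("```"):
--             in_code_block = not in_code_block
--             continue
--         if not line or in_code_block or line.startswith("#"):
--             continue
--         if lower.startswith("description:"):
--             description = line.split(":", 1)[1].strip()[:500]
--             continue
--         if lower.startswith("hypothesis:"):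
--             hypothesis = line.split(":", 1)[1].strip()[:500]
--             continue
--         if not description:
--             description = line[:500]
--         elif not hypothesis:
--             hypothesis = line[:500]
--
--     if not description:
--         description = "LLM-proposed modification"
--
--     if not hypothesis:
--         description, hypothesis = _split_summary(description)
--
--     return description[:500], hypothesis[:500]
--
-- def _split_summary(summary: str) -> tuple[str, str]:
--     """Best-effort split of a one-line summary into what/why."""
--     lower = summary.lower()
--     for marker in (" because ", " since ", " so that "):
--         idx = lower.find(marker)
--         if idx != -1:
--             head = summary[:idx].strip(" .")
--             tail = summary[idx + len(marker) :].strip(" .")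
--             return head or summary[:500], tail or summary[:500]
--     return summary[:500], summary[:500]
-- ===== SOURCE B (Python) =====
-- def _extract_metadata(response: str) -> tuple[str, str]:
--     """Extract description and hypothesis from the LLM response.
--
--     Staged, declarative pipeline: annotate each stripped line with its
--     code-block parity (count of preceding ``` fences, computed recursively),
--     select content lines with a comprehension, then classify them with a
--     recursive function."""
--     stripped = [ln.strip() for ln in response.strip().split("\n")]
--     parities = _parities(stripped, 0)
--     content = [ln for ln, in_code in zip(stripped, parities)
--                if ln and not ln.startswith("```") and not ln.startswith("#")
--                and not in_code]
--     description, hypothesis = _classify(content, "", "")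
--     if not description:
--         description = "LLM-proposed modification"
--     if not hypothesis:
--         description, hypothesis = _split_summary2(description,
--                                                   [" because ", " since ", " so that "])
--     return description[:500], hypothesis[:500]
--
--
-- def _parities(lines, count):
--     """in-code flag per line = parity of the number of ``` fences before it."""
--     if not lines:
--         return []
--     bump = 1 if lines[0].startswith("```") else 0
--     return [count % 2 == 1] + _parities(lines[1:], count + bump)
--
--
-- def _classify(lines, description, hypothesis):
--     """Recursively fill description/hypothesis from the content lines."""
--     if not lines:
--         return description, hypothesis
--     line, rest = lines[0], lines[1:]
--     lower = line.lower()
--     if lower.startswith("description:"):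
--         return _classify(rest, line.split(":", 1)[1].strip()[:500], hypothesis)
--     if lower.startswith("hypothesis:"):
--         return _classify(rest, description, line.split(":", 1)[1].strip()[:500])
--     if not description:
--         return _classify(rest, line[:500], hypothesis)
--     if not hypothesis:
--         return _classify(rest, description, line[:500])
--     return _classify(rest, description, hypothesis)
--
--
-- def _split_summary2(summary, markers):
--     """Best-effort split of a one-line summary into what/why (first marker wins)."""
--     if not markers:
--         return summary[:500], summary[:500]
--     idx = summary.lower().find(markers[0])
--     if idx == -1:
--         return _split_summary2(summary, markers[1:])
--     head = summary[:idx].strip(" .")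
--     tail = summary[idx + len(markers[0]):].strip(" .")
--     return head or summary[:500], tail or summary[:500]
-- ===== Notes on version B (the rewrite author's own statement) =====
-- stated objective: alternative
-- what changed: A is one imperative scan mutating description/hypothesis/in_code_block with a boolean toggle; B is a staged declarative pipeline: a recursive annotation of every line with the parity of the count of ``` fences before it, a comprehension selecting content lines from the zipped pairs, a recursive classifier over that list, and a recursive marker search replacing the summary splitter's loop.
import Mathlib
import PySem

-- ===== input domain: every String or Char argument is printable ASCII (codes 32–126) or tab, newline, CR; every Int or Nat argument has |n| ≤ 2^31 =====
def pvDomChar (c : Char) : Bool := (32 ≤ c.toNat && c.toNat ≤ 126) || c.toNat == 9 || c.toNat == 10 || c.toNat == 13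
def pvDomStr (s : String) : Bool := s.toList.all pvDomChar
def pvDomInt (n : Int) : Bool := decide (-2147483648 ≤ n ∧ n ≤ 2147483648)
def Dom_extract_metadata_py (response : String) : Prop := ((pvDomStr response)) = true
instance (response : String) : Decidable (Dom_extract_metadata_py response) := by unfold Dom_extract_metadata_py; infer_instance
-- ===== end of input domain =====

-- B replaces A's single mutating scan with a staged pipeline: recursive fence-count
-- parity annotation, a comprehension selecting content lines, a recursive classifier,
-- and a recursive marker search; same return value.

-- ===== PORT A =====
-- _split_summary: the for-loop over the three markers, unrolled as A's early-return chain
def pvSplitSummaryA (summary : String) : String × String :=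
  let lower := PySem.Str.lower summary
  let hit := fun (marker : String) (idx : Int) =>
    let head := PySem.Str.stripChars (PySem.Str.slice summary none (some idx)) " ."
    let tail := PySem.Str.stripChars (PySem.Str.slice summary (some (idx + (PySem.Str.len marker : Int))) none) " ."
    ((if head = "" then PySem.Str.slice summary none (some 500) else head),
     (if tail = "" then PySem.Str.slice summary none (some 500) else tail))
  let i1 := PySem.Str.find lower " because "
  if i1 ≠ -1 then hit " because " i1 else
  let i2 := PySem.Str.find lower " since "
  if i2 ≠ -1 then hit " since " i2 else
  let i3 := PySem.Str.find lower " so that "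
  if i3 ≠ -1 then hit " so that " i3 else
  (PySem.Str.slice summary none (some 500), PySem.Str.slice summary none (some 500))

-- body of one iteration of A's loop after 'line = line.strip()'; state = (description, hypothesis, in_code_block)
def pvStepBodyA (st : String × String × Bool) (line : String) : String × String × Bool :=
  let lower := PySem.Str.lower line
  let description := st.1
  let hypothesis := st.2.1
  let in_code_block := st.2.2
  if PySem.Str.startswith line "```" then (description, hypothesis, !in_code_block)
  else if line = "" || in_code_block || PySem.Str.startswith line "#" then st
  else if PySem.Str.startswith lower "description:" then
    -- line.split(":", 1)[1]: the guard guarantees a ':', so index 1 exists; getD is never taken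
    (PySem.Str.slice (PySem.Str.strip (((PySem.Str.splitMax? line ":" 1).getD []).getD 1 "")) none (some 500),
     hypothesis, in_code_block)
  else if PySem.Str.startswith lower "hypothesis:" then
    (description,
     PySem.Str.slice (PySem.Str.strip (((PySem.Str.splitMax? line ":" 1).getD []).getD 1 "")) none (some 500),
     in_code_block)
  else if description = "" then (PySem.Str.slice line none (some 500), hypothesis, in_code_block)
  else if hypothesis = "" then (description, PySem.Str.slice line none (some 500), in_code_block)
  else st

-- one iteration of A's loop: 'line = line.strip()' then the body
def pvStepA (st : String × String × Bool) (raw : String) : String × String × Bool :=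
  pvStepBodyA st (PySem.Str.strip raw)

def extract_metadata_py (response : String) : String × String :=
  let lines := (PySem.Str.split? (PySem.Str.strip response) "\n").getD []
  let res := lines.foldl pvStepA ("", "", false)
  let description := res.1
  let hypothesis := res.2.1
  let description := if description = "" then "LLM-proposed modification" else description
  let dh := if hypothesis = "" then pvSplitSummaryA description else (description, hypothesis)
  (PySem.Str.slice dh.1 none (some 500), PySem.Str.slice dh.2 none (some 500))

-- ===== PORT B =====
-- _parities: in-code flag per line = parity of the number of ``` fences before it
def pvParitiesB : List String → Int → List Bool
  | [], _ => []
  | ln :: rest, count =>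
    let bump : Int := if PySem.Str.startswith ln "```" then 1 else 0
    (count % 2 == 1) :: pvParitiesB rest (count + bump)

-- _classify: recursively fill description/hypothesis from the content lines
def pvClassifyB : List String → String → String → String × String
  | [], description, hypothesis => (description, hypothesis)
  | line :: rest, description, hypothesis =>
    let lower := PySem.Str.lower line
    if PySem.Str.startswith lower "description:" then
      pvClassifyB rest (PySem.Str.slice (PySem.Str.strip (((PySem.Str.splitMax? line ":" 1).getD []).getD 1 "")) none (some 500)) hypothesis
    else if PySem.Str.startswith lower "hypothesis:" then
      pvClassifyB rest description (PySem.Str.slice (PySem.Str.strip (((PySem.Str.splitMax? line ":" 1).getD []).getD 1 "")) none (some 500))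
    else if description = "" then pvClassifyB rest (PySem.Str.slice line none (some 500)) hypothesis
    else if hypothesis = "" then pvClassifyB rest description (PySem.Str.slice line none (some 500))
    else pvClassifyB rest description hypothesis

-- _split_summary2: recursion over the marker list, first marker found wins
def pvSplitSummaryB (summary : String) : List String → String × String
  | [] => (PySem.Str.slice summary none (some 500), PySem.Str.slice summary none (some 500))
  | m :: rest =>
    let idx := PySem.Str.find (PySem.Str.lower summary) m
    if idx = -1 then pvSplitSummaryB summary rest
    else
      let head := PySem.Str.stripChars (PySem.Str.slice summary none (some idx)) " ."
      let tail := PySem.Str.stripChars (PySem.Str.slice summary (some (idx + (PySem.Str.len m : Int))) none) " ."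
      ((if head = "" then PySem.Str.slice summary none (some 500) else head),
       (if tail = "" then PySem.Str.slice summary none (some 500) else tail))

def extract_metadata_py_alt (response : String) : String × String :=
  let stripped := ((PySem.Str.split? (PySem.Str.strip response) "\n").getD []).map PySem.Str.strip
  let parities := pvParitiesB stripped 0
  let content := ((stripped.zip parities).filter
      (fun p => !(p.1 == "") && !(PySem.Str.startswith p.1 "```") && !(PySem.Str.startswith p.1 "#") && !p.2)).map Prod.fst
  let res := pvClassifyB content "" ""
  let description := res.1
  let hypothesis := res.2
  let description := if description = "" then "LLM-proposed modification" else description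
  let dh := if hypothesis = "" then pvSplitSummaryB description [" because ", " since ", " so that "] else (description, hypothesis)
  (PySem.Str.slice dh.1 none (some 500), PySem.Str.slice dh.2 none (some 500))

-- ===== PRECONDITION & SPEC =====
def Spec_extract_metadata_py (response : String) (out : String × String) : Prop := out = extract_metadata_py_alt response
instance (response : String) (out : String × String) : Decidable (Spec_extract_metadata_py response out) := by unfold Spec_extract_metadata_py; infer_instance

-- ===== CLAIM =====
def Claim_equal_extract_metadata_py : Prop := ∀ (response : String), Dom_extract_metadata_py response → Spec_extract_metadata_py response (extract_metadata_py response)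

-- ===== LEMMAS AND PROOFS =====
lemma splitSummary_eq (s : String) :
    pvSplitSummaryA s = pvSplitSummaryB s [" because ", " since ", " so that "] := by
  simp only [pvSplitSummaryA, pvSplitSummaryB]
  split_ifs <;> simp_all

lemma parity_flip (cnt : Int) : ((cnt + 1) % 2 == 1) = !(cnt % 2 == 1) := by
  rcases Int.emod_two_eq cnt with h | h
  · have h1 : (cnt + 1) % 2 = 1 := by omega
    simp [h, h1]
  · have h1 : (cnt + 1) % 2 = 0 := by omega
    simp [h, h1]

lemma loop_eq (S : List String) : ∀ (d h : String) (cnt : Int),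
    ((S.foldl pvStepBodyA (d, h, cnt % 2 == 1)).1, (S.foldl pvStepBodyA (d, h, cnt % 2 == 1)).2.1)
      = pvClassifyB (((S.zip (pvParitiesB S cnt)).filter
          (fun p => !(p.1 == "") && !(PySem.Str.startswith p.1 "```") && !(PySem.Str.startswith p.1 "#") && !p.2)).map Prod.fst) d h := by
  induction S with
  | nil => intro d h cnt; rfl
  | cons ln rest ih =>
    intro d h cnt
    by_cases hq : PySem.Chars.startswith ln.toList ['`', '`', '`'] = true
    · simpa [List.foldl_cons, pvStepBodyA, pvParitiesB, hq, parity_flip cnt] using ih d h (cnt + 1)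
    · by_cases h0 : ln = ""
      · simpa [List.foldl_cons, pvStepBodyA, pvParitiesB, h0,
          show PySem.Chars.startswith ([] : List Char) ['`', '`', '`'] = false from rfl] using ih d h cnt
      · by_cases hc : cnt % 2 = 1
        · simpa [List.foldl_cons, pvStepBodyA, pvParitiesB, hq, h0, hc] using ih d h cnt
        · by_cases hh : PySem.Chars.startswith ln.toList ['#'] = true
          · simpa [List.foldl_cons, pvStepBodyA, pvParitiesB, hq, h0, hc, hh] using ih d h cnt
          · by_cases hd : PySem.Chars.startswith (PySem.Chars.lower ln.toList)
                ['d', 'e', 's', 'c', 'r', 'i', 'p', 't', 'i', 'o', 'n', ':'] = true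
            · simpa [List.foldl_cons, pvStepBodyA, pvParitiesB, pvClassifyB, hq, h0, hc, hh, hd]
                using ih (PySem.Str.slice (PySem.Str.strip (((PySem.Str.splitMax? ln ":" 1).getD []).getD 1 "")) none (some 500)) h cnt
            · by_cases hy : PySem.Chars.startswith (PySem.Chars.lower ln.toList)
                  ['h', 'y', 'p', 'o', 't', 'h', 'e', 's', 'i', 's', ':'] = true
              · simpa [List.foldl_cons, pvStepBodyA, pvParitiesB, pvClassifyB, hq, h0, hc, hh, hd, hy]
                  using ih d (PySem.Str.slice (PySem.Str.strip (((PySem.Str.splitMax? ln ":" 1).getD []).getD 1 "")) none (some 500)) cnt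
              · by_cases hde : d = ""
                · simpa [List.foldl_cons, pvStepBodyA, pvParitiesB, pvClassifyB, hq, h0, hc, hh, hd, hy, hde]
                    using ih (PySem.Str.slice ln none (some 500)) h cnt
                · by_cases hhe : h = ""
                  · simpa [List.foldl_cons, pvStepBodyA, pvParitiesB, pvClassifyB, hq, h0, hc, hh, hd, hy, hde, hhe]
                      using ih d (PySem.Str.slice ln none (some 500)) cnt
                  · simpa [List.foldl_cons, pvStepBodyA, pvParitiesB, pvClassifyB, hq, h0, hc, hh, hd, hy, hde, hhe]
                      using ih d h cnt

lemma foldl_stepA_eq (lines : List String) (st : String × String × Bool) :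
    lines.foldl pvStepA st = (lines.map PySem.Str.strip).foldl pvStepBodyA st := by
  rw [List.foldl_map]; rfl

-- ===== VERDICT =====
theorem extract_metadata_py_spec : Claim_equal_extract_metadata_py := by
  intro response _
  unfold Spec_extract_metadata_py extract_metadata_py extract_metadata_py_alt
  have h := loop_eq (((PySem.Str.split? (PySem.Str.strip response) "\n").getD []).map PySem.Str.strip) "" "" 0
  have h1 := congrArg Prod.fst h
  have h2 := congrArg Prod.snd h
  simp only [show ((0 : Int) % 2 == 1) = false from rfl] at h1 h2
  simp only [foldl_stepA_eq, h1, h2, splitSummary_eq]
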